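-- pv_equiv track=rewrite | github.com/HUHS-AlgorithmStudy/Algorithm-Study-2 | 이수빈/Week5_124나라.py | solution
-- ===== SOURCE A (Python) =====
-- def solution(n):
--     answer = ''
--     number = 0  # 124나라의 숫자
--
--     while n > 0:
--         if n % 3 == 0:
--             number = 4  # n을 3으로 나눈 나머지가 0일 경우 124나라에서는 4로 바꿔주기
--             # 이는 3의 배수인 경우이기 때문에 다음에 확인할 수를 n // 3 - 1로 바꾸어 주기(e.g. 3의 경우 n//3이 0이 아닌 1이 되기 때문)
--             n = n // 3 - 1
--         else:
--             number = n % 3  # 그렇지 않은 경우 해당 숫자를 그대로 할당하기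
--             n //= 3
--         answer = str(number) + answer  # answer 앞에 숫자 붙여 주기
--
--     return answer
-- ===== SOURCE B (Python) =====
-- def solution(n):
--     if n <= 0:
--         return ''
--     q, r = divmod(n, 3)
--     if r == 0:
--         return solution(q - 1) + '4'
--     return solution(q) + str(r)
-- ===== Notes on version B (the rewrite author's own statement) =====
-- stated objective: simpler
-- what changed: Replaced the while-loop with a string-prepending accumulator by a direct recursion over the division chain where the prefix comes from the recursive call.
import Mathlib
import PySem

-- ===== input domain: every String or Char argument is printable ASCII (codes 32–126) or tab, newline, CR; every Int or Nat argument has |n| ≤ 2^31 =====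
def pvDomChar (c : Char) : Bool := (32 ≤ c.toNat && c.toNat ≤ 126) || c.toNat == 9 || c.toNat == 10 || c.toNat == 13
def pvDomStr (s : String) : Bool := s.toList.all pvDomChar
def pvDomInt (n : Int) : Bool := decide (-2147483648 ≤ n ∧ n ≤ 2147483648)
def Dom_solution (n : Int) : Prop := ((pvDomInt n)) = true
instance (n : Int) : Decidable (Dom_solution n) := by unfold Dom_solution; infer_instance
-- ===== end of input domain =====

-- B replaces A's while-loop with prepend-accumulator by a direct recursion over the
-- division chain (the prefix comes from the recursive call); objective: simpler.

-- ===== PORT A =====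
-- A's while-loop: state (n, answer), digit prepended each iteration.
def solutionLoop (n : Int) (answer : String) : String :=
  if _h : n > 0 then
    if PySem.Int.mod n 3 == 0 then
      solutionLoop (PySem.Int.floordiv n 3 - 1) (PySem.Int.toStr 4 ++ answer)
    else
      solutionLoop (PySem.Int.floordiv n 3) (PySem.Int.toStr (PySem.Int.mod n 3) ++ answer)
  else answer
termination_by n.toNat
decreasing_by
  all_goals
    rw [PySem.Int.floordiv_eq_ediv_of_pos (by norm_num : (0:Int) < 3)]
    omega

def solution (n : Int) : String := solutionLoop n ""

-- ===== PORT B =====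
def solution_alt (n : Int) : String :=
  if _h : n ≤ 0 then ""
  else
    let q := PySem.Int.floordiv n 3
    let r := PySem.Int.mod n 3
    if r == 0 then solution_alt (q - 1) ++ "4"
    else solution_alt q ++ PySem.Int.toStr r
termination_by n.toNat
decreasing_by
  all_goals
    rw [PySem.Int.floordiv_eq_ediv_of_pos (by norm_num : (0:Int) < 3)]
    omega

-- ===== PRECONDITION & SPEC =====
def Spec_solution (n : Int) (out : String) : Prop := out = solution_alt n
instance (n : Int) (out : String) : Decidable (Spec_solution n out) := by unfold Spec_solution; infer_instance

-- ===== CLAIM (what is proved, stated in full; the proofs are below) =====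
def Claim_equal_solution : Prop := ∀ (n : Int), Dom_solution n → Spec_solution n (solution n)

-- ===== LEMMAS AND PROOFS =====

theorem loop_eq_alt (k : Nat) : ∀ (n : Int), n.toNat ≤ k → ∀ (answer : String),
    solutionLoop n answer = solution_alt n ++ answer := by
  induction k with
  | zero =>
    intro n hn answer
    have hle : n ≤ 0 := by omega
    rw [solutionLoop, solution_alt]
    simp [hle, not_lt.mpr hle]
  | succ k ih =>
    intro n hn answer
    by_cases h : n > 0
    · have h3 : (0:Int) < 3 := by norm_num
      have hlt : (PySem.Int.floordiv n 3).toNat ≤ k := by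
        rw [PySem.Int.floordiv_eq_ediv_of_pos h3]; omega
      have hlt' : (PySem.Int.floordiv n 3 - 1).toNat ≤ k := by
        rw [PySem.Int.floordiv_eq_ediv_of_pos h3]; omega
      have h4 : PySem.Int.toStr 4 = "4" := by decide
      rw [solutionLoop, solution_alt]
      simp only [dif_pos h, dif_neg (not_le.mpr h)]
      split_ifs with hd
      · rw [ih _ hlt', h4, String.append_assoc]
      · rw [ih _ hlt, String.append_assoc]
    · have hle : n ≤ 0 := by omega
      rw [solutionLoop, solution_alt]
      simp [hle, h]

-- ===== VERDICT (by name: the statement is the Claim_ definition above) =====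
theorem solution_spec : Claim_equal_solution := by
  intro n _
  unfold Spec_solution solution
  rw [loop_eq_alt n.toNat n le_rfl]
  simp
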